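-- pv_equiv track=rewrite | github.com/chhezue/Algorithm_Study | Algo_Study/Brute-Force/pg_468377.py | solution
-- ===== SOURCE A (Python) =====
-- def solution(cost, hint):
--     k = len(hint[0][1:]) # 힌트권 개수
--     my_hint = []
--
--     def min_cost(index, my_hint):
--         # Base Case: 마지막 스테이지까지 마친 후
--         if index == len(cost):
--             return 0
--
--         # 구매한 힌트권 사용
--         count = my_hint.count(index + 1)
--         if count >= len(cost) - 1:
--             count = len(cost) - 1
--         cur_cost = cost[index][count] # 힌트권을 사용한 스테이지 해결 비용
--
--         # 1. 힌트 번들을 구매하지 않는 경우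
--         cost_a = cur_cost + min_cost(index + 1, my_hint)
--
--         # 2. 힌트 번들을 구매하는 경우
--         # 마지막 스테이지가 아닌 경우
--         if index != len(hint):
--             buy_cost = hint[index][0]
--             new_buy_hint = my_hint.copy()
--
--             for j in range(1, k + 1):
--                 new_buy_hint.append(hint[index][j]) # 힌트권 각각 추가
--             cost_b = cur_cost + buy_cost + min_cost(index + 1, new_buy_hint)
--         # 마지막 스테이지에서는 번들을 살 수 없다.
--         else:
--             cost_b = cost_a
--
--         return min(cost_a, cost_b)
--
--     return min_cost(0, my_hint)
-- ===== SOURCE B (Python) =====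
-- def solution(cost, hint):
--     k = len(hint[0][1:])
--     n = len(cost)
--     buyable = [i for i in range(n) if i != len(hint)]
--     m = len(buyable)
--
--     def total_for(bought):
--         total = sum(hint[j][0] for j in bought)
--         for i in range(n):
--             c = sum(hint[j][1:k + 1].count(i + 1) for j in bought if j < i)
--             total += cost[i][min(c, n - 1)]
--         return total
--
--     best = total_for([])
--     for mask in range(1, 1 << m):
--         bought = []
--         mm = mask
--         for j in buyable:
--             if mm & 1:
--                 bought.append(j)
--             mm >>= 1
--         t = total_for(bought)
--         if t < best:
--             best = t
--     return best
-- ===== Notes on version B (the rewrite author's own statement) =====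
-- stated objective: alternative
-- what changed: Replaces A's binary buy/skip recursion that threads a growing token list through the call tree with an explicit bitmask enumeration of all subsets of buyable stages, computing each subset's total by a forward pass that counts hint tokens per stage.
import Mathlib
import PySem

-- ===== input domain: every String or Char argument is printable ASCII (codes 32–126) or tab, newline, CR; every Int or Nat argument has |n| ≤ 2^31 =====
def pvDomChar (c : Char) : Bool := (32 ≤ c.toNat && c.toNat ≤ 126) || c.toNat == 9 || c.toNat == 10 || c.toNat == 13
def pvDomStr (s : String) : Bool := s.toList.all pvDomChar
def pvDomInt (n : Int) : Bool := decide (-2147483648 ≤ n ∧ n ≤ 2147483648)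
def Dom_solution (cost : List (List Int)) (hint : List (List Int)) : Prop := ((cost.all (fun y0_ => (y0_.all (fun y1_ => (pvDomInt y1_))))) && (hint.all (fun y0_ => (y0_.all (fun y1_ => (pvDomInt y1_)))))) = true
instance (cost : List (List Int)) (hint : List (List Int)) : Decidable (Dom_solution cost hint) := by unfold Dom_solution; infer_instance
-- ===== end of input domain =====

-- B re-implements the exhaustive search as a bitmask enumeration over the subsets of buyable
-- stages instead of A's binary recursion carrying a growing token list (objective: alternative,
-- same exponential cost). Equivalence is about the return value; neither mutates its arguments.

-- ===== PORT A =====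
-- fuel = cost.length - index; base case `index == len(cost)` is fuel 0.
-- cost[index][count], hint[index][j]: indices are nonnegative and in range under Pre_solution,
-- so List.getD is exact there.
def pvMinCost (cost hint : List (List Int)) (k : Nat) : Nat → Nat → List Int → Int
  | 0, _, _ => 0
  | rem+1, index, myHint =>
    let count0 := myHint.count ((index : Int) + 1)
    let count := if cost.length - 1 ≤ count0 then cost.length - 1 else count0
    let cur := (cost.getD index []).getD count 0
    let costA := cur + pvMinCost cost hint k rem (index+1) myHint
    let costB :=
      if index ≠ hint.length then
        let buy := (hint.getD index []).getD 0 0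
        let newHint := (List.range' 1 k).foldl (fun acc j => acc ++ [(hint.getD index []).getD j 0]) myHint
        cur + buy + pvMinCost cost hint k rem (index+1) newHint
      else costA
    min costA costB

-- k = len(hint[0][1:]); hint[0] exists under Pre_solution
def solution (cost : List (List Int)) (hint : List (List Int)) : Int :=
  pvMinCost cost hint ((hint.getD 0 []).drop 1).length cost.length 0 []

-- ===== PORT B =====
-- hint[j][1:k+1] has nonnegative slice bounds, so it is (drop 1).take k exactly.
def pvAltTotal (cost hint : List (List Int)) (k n : Nat) (bought : List Nat) : Int :=
  let total := (bought.map (fun j => (hint.getD j []).getD 0 0)).sum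
  (List.range n).foldl (fun total i =>
    let c := ((bought.filter (fun j => decide (j < i))).map
        (fun j => (((hint.getD j []).drop 1).take k).count ((i : Int) + 1))).sum
    total + (cost.getD i []).getD (min c (n - 1)) 0) total

def solution_alt (cost : List (List Int)) (hint : List (List Int)) : Int :=
  let k := ((hint.getD 0 []).drop 1).length
  let n := cost.length
  let buyable := (List.range n).filter (fun i => decide (i ≠ hint.length))
  let m := buyable.length
  let best := pvAltTotal cost hint k n []
  (List.range' 1 (1 <<< m - 1)).foldl (fun best mask =>
    let bought := (buyable.foldl (fun (st : List Nat × Nat) j =>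
        (if st.2 &&& 1 = 1 then st.1 ++ [j] else st.1, st.2 >>> 1)) ([], mask)).1
    let t := pvAltTotal cost hint k n bought
    if t < best then t else best) best

-- ===== PRECONDITION & SPEC =====
-- Pre_solution = exactly the inputs on which Python A returns normally: hint[0] must exist
-- (else IndexError computing k); every buyable stage row hint[i] must have the k+1 entries
-- A reads (else IndexError; this also forces every buyable index < len(hint)); and row
-- cost[i] must be long enough for the largest capped hint count any purchase subset can
-- produce at stage i (else IndexError on cost[i][count]).
def Pre_solution (cost : List (List Int)) (hint : List (List Int)) : Prop :=
  hint ≠ [] ∧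
  ∀ i, i < cost.length →
    (i ≠ hint.length → ((hint.getD 0 []).drop 1).length + 1 ≤ (hint.getD i []).length) ∧
    min (((List.range i).filter (fun j => decide (j ≠ hint.length))).map
          (fun j => (((hint.getD j []).drop 1).take ((hint.getD 0 []).drop 1).length).count ((i : Int) + 1))).sum
        (cost.length - 1) + 1 ≤ (cost.getD i []).length
instance (cost : List (List Int)) (hint : List (List Int)) : Decidable (Pre_solution cost hint) := by
  unfold Pre_solution; infer_instance

def pvWitness_solution : List (List Int) × List (List Int) := ([[4, 2], [3, 1]], [[5, 1, 2], [6, 2, 2]])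

def Spec_solution (cost : List (List Int)) (hint : List (List Int)) (out : Int) : Prop := out = solution_alt cost hint
instance (cost : List (List Int)) (hint : List (List Int)) (out : Int) : Decidable (Spec_solution cost hint out) := by unfold Spec_solution; infer_instance

-- ===== CLAIM (what is proved, stated in full; the proofs are below) =====
def Claim_equal_solution : Prop := ∀ (cost : List (List Int)) (hint : List (List Int)), Dom_solution cost hint → Pre_solution cost hint → Spec_solution cost hint (solution cost hint)

-- ===== LEMMAS AND PROOFS =====

-- the common value both searches compute for a fixed purchase set `bought`
def pvBody (cost hint : List (List Int)) (k index rem : Nat) (myHint : List Int) (bought : List Nat) : Int :=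
  (bought.map (fun j => (hint.getD j []).getD 0 0)).sum +
  ((List.range' index rem).map (fun i =>
    (cost.getD i []).getD
      (min (myHint.count ((i : Int) + 1) +
            ((bought.filter (fun j => decide (j < i))).map
              (fun j => (((hint.getD j []).drop 1).take k).count ((i : Int) + 1))).sum)
        (cost.length - 1)) 0)).sum

-- min of g over {acc ++ c : c a subset of l}, in A's branching order
def pvMsub (g : List Nat → Int) : List Nat → List Nat → Int
  | acc, [] => g acc
  | acc, x :: xs => min (pvMsub g acc xs) (pvMsub g (acc ++ [x]) xs)

-- the subset of l selected by the bits of mask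
def pvSel : List Nat → Nat → List Nat
  | [], _ => []
  | x :: xs, mask => (if mask &&& 1 = 1 then [x] else []) ++ pvSel xs (mask >>> 1)

-- minimum of a nonempty list (0 for [])
def pvMinH : List Int → Int
  | [] => 0
  | x :: xs => xs.foldl min x

theorem pvMsub_acc (g : List Nat → Int) (l acc : List Nat) :
    pvMsub g acc l = pvMsub (fun b => g (acc ++ b)) [] l := by
  induction l generalizing g acc with
  | nil => simp [pvMsub]
  | cons x xs ih =>
    simp only [pvMsub, List.nil_append]
    rw [ih g acc, ih g (acc ++ [x]), ih (fun b => g (acc ++ b)) [x]]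
    simp [List.append_assoc]

theorem pvMsub_congr (g g' : List Nat → Int) (l acc : List Nat)
    (h : ∀ c, c.Sublist l → g (acc ++ c) = g' (acc ++ c)) :
    pvMsub g acc l = pvMsub g' acc l := by
  induction l generalizing acc with
  | nil => simpa using h [] (List.Sublist.refl [])
  | cons x xs ih =>
    simp only [pvMsub]
    rw [ih acc (fun c hc => h c (hc.cons x)),
        ih (acc ++ [x]) (fun c hc => by simpa [List.append_assoc] using h (x :: c) (hc.cons₂ x))]

theorem pvMsub_add (g : List Nat → Int) (l acc : List Nat) (a : Int) :
    pvMsub (fun b => a + g b) acc l = a + pvMsub g acc l := by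
  induction l generalizing acc with
  | nil => simp [pvMsub]
  | cons x xs ih =>
    simp only [pvMsub]
    rw [ih acc, ih (acc ++ [x]), min_add_add_left]

theorem pvFoldlMin_min (l : List Int) (a b : Int) :
    l.foldl min (min a b) = min a (l.foldl min b) := by
  induction l generalizing b with
  | nil => simp
  | cons c cs ih =>
    simp only [List.foldl_cons]
    rw [min_assoc, ih]

theorem pvFoldlMin_le_init (l : List Int) (a : Int) : l.foldl min a ≤ a := by
  induction l generalizing a with
  | nil => simp
  | cons c cs ih =>
    simp only [List.foldl_cons]
    exact le_trans (ih (min a c)) (min_le_left _ _)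

theorem pvFoldlMin_mem (l : List Int) (a : Int) : l.foldl min a = a ∨ l.foldl min a ∈ l := by
  induction l generalizing a with
  | nil => simp
  | cons c cs ih =>
    simp only [List.foldl_cons]
    rcases ih (min a c) with h | h
    · rcases min_choice a c with h2 | h2
      · left; rw [h, h2]
      · right; rw [h, h2]; exact List.mem_cons_self
    · right; exact List.mem_cons_of_mem _ h

theorem pvFoldlMin_le (l : List Int) (a x : Int) (h : x ∈ a :: l) : l.foldl min a ≤ x := by
  induction l generalizing a with
  | nil =>
    simp at h
    simp [h]
  | cons c cs ih =>
    simp only [List.foldl_cons]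
    rcases List.mem_cons.mp h with rfl | h2
    · exact le_trans (pvFoldlMin_le_init cs (min x c)) (min_le_left _ _)
    · rcases List.mem_cons.mp h2 with rfl | h3
      · exact le_trans (pvFoldlMin_le_init cs (min a x)) (min_le_right _ _)
      · exact ih (min a c) (List.mem_cons_of_mem _ h3)

theorem pvMinH_mem (l : List Int) (h : l ≠ []) : pvMinH l ∈ l := by
  cases l with
  | nil => exact absurd rfl h
  | cons x xs =>
    simp only [pvMinH]
    rcases pvFoldlMin_mem xs x with h2 | h2
    · rw [h2]; exact List.mem_cons_self
    · exact List.mem_cons_of_mem _ h2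

theorem pvMinH_le (l : List Int) (x : Int) (h : x ∈ l) : pvMinH l ≤ x := by
  cases l with
  | nil => simp at h
  | cons y ys => exact pvFoldlMin_le ys y x h

theorem pvMinH_eq_of_mem (l₁ l₂ : List Int) (h₁ : l₁ ≠ []) (h₂ : l₂ ≠ [])
    (h : ∀ x, x ∈ l₁ ↔ x ∈ l₂) : pvMinH l₁ = pvMinH l₂ := by
  apply le_antisymm
  · exact pvMinH_le l₁ _ ((h _).mpr (pvMinH_mem l₂ h₂))
  · exact pvMinH_le l₂ _ ((h _).mp (pvMinH_mem l₁ h₁))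

theorem pvMinH_append (l₁ l₂ : List Int) (h₁ : l₁ ≠ []) (h₂ : l₂ ≠ []) :
    pvMinH (l₁ ++ l₂) = min (pvMinH l₁) (pvMinH l₂) := by
  obtain ⟨x, xs, rfl⟩ := List.exists_cons_of_ne_nil h₁
  obtain ⟨y, ys, rfl⟩ := List.exists_cons_of_ne_nil h₂
  simp only [pvMinH, List.cons_append]
  rw [List.foldl_append, List.foldl_cons, pvFoldlMin_min]

theorem pvRange_two_mul (N : Nat) :
    List.range (2 * N) = (List.range N).flatMap (fun t => [2 * t, 2 * t + 1]) := by
  induction N with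
  | zero => simp
  | succ N ih =>
    have h : 2 * (N + 1) = (2 * N + 1) + 1 := by ring
    rw [h, List.range_succ, List.range_succ, ih, List.range_succ, List.flatMap_append]
    simp

theorem pvSel_zero (l : List Nat) : pvSel l 0 = [] := by
  induction l with
  | nil => rfl
  | cons x xs ih => simp [pvSel, ih]

theorem pvSel_even (x : Nat) (xs : List Nat) (t : Nat) : pvSel (x :: xs) (2 * t) = pvSel xs t := by
  have h1 : 2 * t &&& 1 = 0 := by rw [Nat.and_one_is_mod]; omega
  have h2 : (2 * t) >>> 1 = t := by
    rw [Nat.shiftRight_one]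
    omega
  simp only [pvSel]
  rw [h1, h2]
  simp

theorem pvSel_odd (x : Nat) (xs : List Nat) (t : Nat) :
    pvSel (x :: xs) (2 * t + 1) = x :: pvSel xs t := by
  have h1 : (2 * t + 1) &&& 1 = 1 := by rw [Nat.and_one_is_mod]; omega
  have h2 : (2 * t + 1) >>> 1 = t := by
    rw [Nat.shiftRight_one]
    omega
  simp only [pvSel]
  rw [h1, h2]
  simp

theorem pvSubsetMin (l : List Nat) (g : List Nat → Int) :
    pvMinH ((List.range (2 ^ l.length)).map (fun mask => g (pvSel l mask))) = pvMsub g [] l := by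
  induction l generalizing g with
  | nil => simp [pvMinH, pvMsub, pvSel]
  | cons x xs ih =>
    have hN : (0:Nat) < 2 ^ xs.length := Nat.two_pow_pos _
    have h2 : (2:Nat) ^ (x :: xs).length = 2 * 2 ^ xs.length := by
      simp [List.length_cons, pow_succ, Nat.mul_comm]
    rw [h2, pvRange_two_mul, List.map_flatMap]
    simp only [List.map_cons, List.map_nil, pvSel_even, pvSel_odd]
    have hne1 : ((List.range (2 ^ xs.length)).map (fun t => g (pvSel xs t))) ≠ [] := by
      intro hcon
      rw [List.map_eq_nil_iff, List.range_eq_nil] at hcon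
      omega
    have hne2 : ((List.range (2 ^ xs.length)).map (fun t => g (x :: pvSel xs t))) ≠ [] := by
      intro hcon
      rw [List.map_eq_nil_iff, List.range_eq_nil] at hcon
      omega
    have hneF : ((List.range (2 ^ xs.length)).flatMap
        (fun t => [g (pvSel xs t), g (x :: pvSel xs t)])) ≠ [] := by
      intro hc
      have h0 : g (pvSel xs 0) ∈ ((List.range (2 ^ xs.length)).flatMap
          (fun t => [g (pvSel xs t), g (x :: pvSel xs t)])) :=
        List.mem_flatMap.mpr ⟨0, List.mem_range.mpr hN, List.mem_cons_self⟩
      rw [hc] at h0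
      simp at h0
    have hmem : ∀ a, a ∈ ((List.range (2 ^ xs.length)).flatMap
          (fun t => [g (pvSel xs t), g (x :: pvSel xs t)])) ↔
        a ∈ (((List.range (2 ^ xs.length)).map (fun t => g (pvSel xs t))) ++
             ((List.range (2 ^ xs.length)).map (fun t => g (x :: pvSel xs t)))) := by
      intro a
      constructor
      · intro ha
        rcases List.mem_flatMap.mp ha with ⟨t, ht, hin⟩
        rcases List.mem_cons.mp hin with h | h
        · exact List.mem_append_left _ (List.mem_map.mpr ⟨t, ht, h.symm⟩)
        · have h' : a = g (x :: pvSel xs t) := by simpa using h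
          exact List.mem_append_right _ (List.mem_map.mpr ⟨t, ht, h'.symm⟩)
      · intro ha
        rcases List.mem_append.mp ha with h | h
        · rcases List.mem_map.mp h with ⟨t, ht, hv⟩
          exact List.mem_flatMap.mpr ⟨t, ht, by simp [← hv]⟩
        · rcases List.mem_map.mp h with ⟨t, ht, hv⟩
          exact List.mem_flatMap.mpr ⟨t, ht, by simp [← hv]⟩
    rw [pvMinH_eq_of_mem _ _ hneF (by simp [hne1]) hmem]
    rw [pvMinH_append _ _ hne1 hne2, ih g, ih (fun b => g (x :: b))]
    simp only [pvMsub, List.nil_append]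
    rw [pvMsub_acc g xs [x]]
    simp only [List.singleton_append]

theorem pvPadCount (l : List Int) (k : Nat) (v : Int) (hv : v ≠ 0) :
    ((List.range' 1 k).map (fun j => l.getD j 0)).count v = ((l.drop 1).take k).count v := by
  induction k with
  | zero => simp
  | succ k ih =>
    rw [List.range'_concat, List.map_append, List.count_append, ih, List.take_add_one,
        List.count_append]
    congr 1
    simp only [List.map_cons, List.map_nil]
    have h1 : 1 + 1 * k = 1 + k := by omega
    rw [h1, List.getD_eq_getElem?_getD, List.getElem?_drop]
    cases h : l[1 + k]? with
    | none => simp [Ne.symm hv]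
    | some a => simp

theorem pvBuild (l : List Nat) (acc : List Nat) (mm : Nat) :
    (l.foldl (fun (st : List Nat × Nat) j =>
      (if st.2 &&& 1 = 1 then st.1 ++ [j] else st.1, st.2 >>> 1)) (acc, mm)).1 = acc ++ pvSel l mm := by
  induction l generalizing acc mm with
  | nil => simp [pvSel]
  | cons x xs ih =>
    simp only [List.foldl_cons, pvSel]
    by_cases h : mm &&& 1 = 1
    · rw [if_pos h, if_pos h, ih]
      simp
    · rw [if_neg h, if_neg h, ih]
      simp

theorem pvAltTotal_eq_body (cost hint : List (List Int)) (k : Nat) (bought : List Nat) :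
    pvAltTotal cost hint k cost.length bought = pvBody cost hint k 0 cost.length [] bought := by
  simp only [pvAltTotal, pvBody]
  rw [PySem.List.foldl_add]
  rw [List.range_eq_range']
  simp

theorem pvMinCost_succ (cost hint : List (List Int)) (k rem index : Nat) (myHint : List Int) :
    pvMinCost cost hint k (rem+1) index myHint =
      min ((cost.getD index []).getD (min (myHint.count ((index : Int) + 1)) (cost.length - 1)) 0
            + pvMinCost cost hint k rem (index+1) myHint)
          (if index ≠ hint.length then
            (cost.getD index []).getD (min (myHint.count ((index : Int) + 1)) (cost.length - 1)) 0
              + (hint.getD index []).getD 0 0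
              + pvMinCost cost hint k rem (index+1)
                  (myHint ++ (List.range' 1 k).map (fun j => (hint.getD index []).getD j 0))
          else
            (cost.getD index []).getD (min (myHint.count ((index : Int) + 1)) (cost.length - 1)) 0
              + pvMinCost cost hint k rem (index+1) myHint) := by
  have hcap : (if cost.length - 1 ≤ myHint.count ((index : Int) + 1) then cost.length - 1
      else myHint.count ((index : Int) + 1)) = min (myHint.count ((index : Int) + 1)) (cost.length - 1) := by
    rw [min_def]; split_ifs <;> omega
  simp only [pvMinCost, PySem.List.foldl_append_singleton_eq_map, hcap]

theorem pvBody_nobuy (cost hint : List (List Int)) (k index rem : Nat) (myHint : List Int)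
    (c : List Nat) (hc : ∀ j ∈ c, index < j) :
    pvBody cost hint k index (rem+1) myHint c
      = (cost.getD index []).getD (min (myHint.count ((index : Int) + 1)) (cost.length - 1)) 0
        + pvBody cost hint k (index+1) rem myHint c := by
  have hf : c.filter (fun j => decide (j < index)) = [] :=
    List.filter_eq_nil_iff.mpr (fun j hj => by simpa using Nat.lt_asymm (hc j hj))
  simp only [pvBody, List.range'_succ, List.map_cons, List.sum_cons, hf, List.map_nil,
    List.sum_nil, Nat.add_zero]
  ring

theorem pvBody_buy (cost hint : List (List Int)) (k index rem : Nat) (myHint : List Int)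
    (c : List Nat) (hc : ∀ j ∈ c, index < j) :
    pvBody cost hint k index (rem+1) myHint (index :: c)
      = (cost.getD index []).getD (min (myHint.count ((index : Int) + 1)) (cost.length - 1)) 0
        + (hint.getD index []).getD 0 0
        + pvBody cost hint k (index+1) rem
            (myHint ++ (List.range' 1 k).map (fun j => (hint.getD index []).getD j 0)) c := by
  have hf : c.filter (fun j => decide (j < index)) = [] :=
    List.filter_eq_nil_iff.mpr (fun j hj => by simpa using Nat.lt_asymm (hc j hj))
  have hstage : ∀ i ∈ List.range' (index+1) rem,
      (cost.getD i []).getD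
        (min (myHint.count ((i : Int) + 1) +
              (((index :: c).filter (fun j => decide (j < i))).map
                (fun j => (((hint.getD j []).drop 1).take k).count ((i : Int) + 1))).sum)
          (cost.length - 1)) 0
      = (cost.getD i []).getD
        (min ((myHint ++ (List.range' 1 k).map (fun j => (hint.getD index []).getD j 0)).count ((i : Int) + 1) +
              ((c.filter (fun j => decide (j < i))).map
                (fun j => (((hint.getD j []).drop 1).take k).count ((i : Int) + 1))).sum)
          (cost.length - 1)) 0 := by
    intro i hi
    have hii : index < i := by
      have := (List.mem_range'_1.mp hi).1; omega
    have hv : ((i : Int) + 1) ≠ 0 := by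
      have := Int.natCast_nonneg i; omega
    rw [List.filter_cons_of_pos (by simpa using hii), List.map_cons, List.sum_cons,
        List.count_append, pvPadCount _ _ _ hv]
    congr 2
    omega
  have hfc : (index :: c).filter (fun j => decide (j < index)) = [] := by
    simp [hf]
  simp only [pvBody, List.range'_succ, List.map_cons, List.sum_cons, hfc, List.map_nil,
    List.sum_nil, Nat.add_zero]
  rw [List.map_congr_left hstage]
  ring

theorem pvALemma (cost hint : List (List Int)) (k : Nat) (rem index : Nat) (myHint : List Int) :
    pvMinCost cost hint k rem index myHint =
      pvMsub (pvBody cost hint k index rem myHint) []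
        ((List.range' index rem).filter (fun i => decide (i ≠ hint.length))) := by
  induction rem generalizing index myHint with
  | zero => simp [pvMinCost, pvMsub, pvBody]
  | succ rem ih =>
    have hsub : ∀ c : List Nat,
        c.Sublist ((List.range' (index+1) rem).filter (fun i => decide (i ≠ hint.length))) →
        ∀ j ∈ c, index < j := by
      intro c hcs j hj
      have h1 : j ∈ List.range' (index+1) rem := List.mem_of_mem_filter (hcs.subset hj)
      have := (List.mem_range'_1.mp h1).1; omega
    rw [pvMinCost_succ, List.range'_succ]
    by_cases hb : index = hint.length
    · rw [if_neg (by simp [hb])]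
      have hfc : (index :: List.range' (index+1) rem).filter (fun i => decide (i ≠ hint.length))
          = (List.range' (index+1) rem).filter (fun i => decide (i ≠ hint.length)) := by
        simp [hb]
      rw [hfc, min_self]
      rw [pvMsub_congr (pvBody cost hint k index (rem+1) myHint)
          (fun b => (cost.getD index []).getD (min (myHint.count ((index : Int) + 1)) (cost.length - 1)) 0
            + pvBody cost hint k (index+1) rem myHint b) _ []
          (fun c hcs => by simpa using pvBody_nobuy cost hint k index rem myHint c (hsub c hcs))]
      rw [pvMsub_add, ih]
    · rw [if_pos hb]
      have hfc : (index :: List.range' (index+1) rem).filter (fun i => decide (i ≠ hint.length))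
          = index :: (List.range' (index+1) rem).filter (fun i => decide (i ≠ hint.length)) := by
        simp [hb]
      rw [hfc]
      simp only [pvMsub, List.nil_append]
      congr 1
      · rw [pvMsub_congr (pvBody cost hint k index (rem+1) myHint)
            (fun b => (cost.getD index []).getD (min (myHint.count ((index : Int) + 1)) (cost.length - 1)) 0
              + pvBody cost hint k (index+1) rem myHint b) _ []
            (fun c hcs => by simpa using pvBody_nobuy cost hint k index rem myHint c (hsub c hcs))]
        rw [pvMsub_add, ih]
      · rw [pvMsub_acc]
        rw [pvMsub_congr (fun b => pvBody cost hint k index (rem+1) myHint ([index] ++ b))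
            (fun b => ((cost.getD index []).getD (min (myHint.count ((index : Int) + 1)) (cost.length - 1)) 0
                + (hint.getD index []).getD 0 0)
              + pvBody cost hint k (index+1) rem
                  (myHint ++ (List.range' 1 k).map (fun j => (hint.getD index []).getD j 0)) b) _ []
            (fun c hcs => by
              simpa [add_assoc] using pvBody_buy cost hint k index rem myHint c (hsub c hcs))]
        rw [pvMsub_add, ih]

-- ===== VERDICT (by name: the statement is the Claim_ definition above) =====
theorem solution_spec : Claim_equal_solution := by
  unfold Claim_equal_solution
  intro cost hint _ _
  unfold Spec_solution
  have hA : solution cost hint =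
      pvMsub (pvBody cost hint ((hint.getD 0 []).drop 1).length 0 cost.length []) []
        ((List.range cost.length).filter (fun i => decide (i ≠ hint.length))) := by
    simp only [solution]
    rw [pvALemma, List.range_eq_range']
  have hone : (1:Nat) <<< ((List.range cost.length).filter (fun i => decide (i ≠ hint.length))).length
      = 2 ^ ((List.range cost.length).filter (fun i => decide (i ≠ hint.length))).length :=
    Nat.one_shiftLeft _
  have hpow : (1:Nat) ≤ 2 ^ ((List.range cost.length).filter (fun i => decide (i ≠ hint.length))).length :=
    Nat.one_le_two_pow
  have hrange : List.range (2 ^ ((List.range cost.length).filter (fun i => decide (i ≠ hint.length))).length)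
      = 0 :: List.range' 1 (2 ^ ((List.range cost.length).filter (fun i => decide (i ≠ hint.length))).length - 1) := by
    rw [List.range_eq_range']
    conv_lhs => rw [show 2 ^ ((List.range cost.length).filter (fun i => decide (i ≠ hint.length))).length
        = (2 ^ ((List.range cost.length).filter (fun i => decide (i ≠ hint.length))).length - 1) + 1 from by omega]
    rw [List.range'_succ]
  have hB : solution_alt cost hint =
      pvMsub (pvBody cost hint ((hint.getD 0 []).drop 1).length 0 cost.length []) []
        ((List.range cost.length).filter (fun i => decide (i ≠ hint.length))) := by
    simp only [solution_alt]
    rw [hone]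
    have hstepf : (fun (best : Int) (mask : Nat) =>
          (if pvAltTotal cost hint ((hint.getD 0 []).drop 1).length cost.length
              ((((List.range cost.length).filter (fun i => decide (i ≠ hint.length))).foldl
                (fun (st : List Nat × Nat) j =>
                  (if st.2 &&& 1 = 1 then st.1 ++ [j] else st.1, st.2 >>> 1)) ([], mask)).1) < best
           then pvAltTotal cost hint ((hint.getD 0 []).drop 1).length cost.length
              ((((List.range cost.length).filter (fun i => decide (i ≠ hint.length))).foldl
                (fun (st : List Nat × Nat) j =>
                  (if st.2 &&& 1 = 1 then st.1 ++ [j] else st.1, st.2 >>> 1)) ([], mask)).1)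
           else best))
        = (fun (best : Int) (mask : Nat) =>
            min best (pvAltTotal cost hint ((hint.getD 0 []).drop 1).length cost.length
              (pvSel ((List.range cost.length).filter (fun i => decide (i ≠ hint.length))) mask))) := by
      funext best mask
      rw [pvBuild]
      simp only [List.nil_append]
      rw [min_def]
      split_ifs <;> omega
    rw [hstepf]
    rw [← List.foldl_map]
    have hinit : pvAltTotal cost hint ((hint.getD 0 []).drop 1).length cost.length []
        = pvAltTotal cost hint ((hint.getD 0 []).drop 1).length cost.length
            (pvSel ((List.range cost.length).filter (fun i => decide (i ≠ hint.length))) 0) := by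
      rw [pvSel_zero]
    rw [hinit]
    have hmh : ((List.range' 1 (2 ^ ((List.range cost.length).filter (fun i => decide (i ≠ hint.length))).length - 1)).map
          (fun mask => pvAltTotal cost hint ((hint.getD 0 []).drop 1).length cost.length
            (pvSel ((List.range cost.length).filter (fun i => decide (i ≠ hint.length))) mask))).foldl min
          (pvAltTotal cost hint ((hint.getD 0 []).drop 1).length cost.length
            (pvSel ((List.range cost.length).filter (fun i => decide (i ≠ hint.length))) 0))
        = pvMinH ((List.range (2 ^ ((List.range cost.length).filter (fun i => decide (i ≠ hint.length))).length)).map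
            (fun mask => pvAltTotal cost hint ((hint.getD 0 []).drop 1).length cost.length
              (pvSel ((List.range cost.length).filter (fun i => decide (i ≠ hint.length))) mask))) := by
      rw [hrange, List.map_cons]
      simp only [pvMinH]
    rw [hmh, pvSubsetMin]
    have hfun : (fun bought => pvAltTotal cost hint ((hint.getD 0 []).drop 1).length cost.length bought)
        = pvBody cost hint ((hint.getD 0 []).drop 1).length 0 cost.length [] :=
      funext (fun bought => pvAltTotal_eq_body cost hint ((hint.getD 0 []).drop 1).length bought)
    exact congrArg (fun g => pvMsub g []
      ((List.range cost.length).filter (fun i => decide (i ≠ hint.length)))) hfun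
  rw [hA, hB]
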